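-- pv_equiv track=rewrite | github.com/ianpcook/covibe | src/covibe/utils/validation.py | detect_personality_type
-- ===== SOURCE A (Python) =====
-- from typing import List, Optional, Tuple
--
-- def detect_personality_type(description: str) -> Optional[str]:
--     """
--     Attempt to detect personality type from description.
--
--     Returns:
--         Detected type or None if unclear
--     """
--     description_lower = description.lower()
--
--     # Celebrity indicators
--     celebrity_indicators = [
--         'actor', 'actress', 'singer', 'musician', 'politician', 'scientist',
--         'author', 'writer', 'director', 'artist', 'athlete', 'celebrity'
--     ]
--
--     # Fictional character indicators
--     fictional_indicators = [
--         'character', 'from', 'movie', 'book', 'tv show', 'series', 'novel',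
--         'comic', 'anime', 'manga', 'game', 'fictional'
--     ]
--
--     # Archetype indicators
--     archetype_indicators = [
--         'cowboy', 'robot', 'drill sergeant', 'mentor', 'teacher', 'coach',
--         'pirate', 'knight', 'wizard', 'detective', 'scientist', 'rebel'
--     ]
--
--     for indicator in celebrity_indicators:
--         if indicator in description_lower:
--             return "celebrity"
--
--     for indicator in fictional_indicators:
--         if indicator in description_lower:
--             return "fictional"
--
--     for indicator in archetype_indicators:
--         if indicator in description_lower:
--             return "archetype"
--
--     return None
-- ===== SOURCE B (Python) =====
-- _CATEGORIES = ["celebrity", "fictional", "archetype"]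
--
-- _CELEBRITY = [
--     'actor', 'actress', 'singer', 'musician', 'politician', 'scientist',
--     'author', 'writer', 'director', 'artist', 'athlete', 'celebrity'
-- ]
-- _FICTIONAL = [
--     'character', 'from', 'movie', 'book', 'tv show', 'series', 'novel',
--     'comic', 'anime', 'manga', 'game', 'fictional'
-- ]
-- _ARCHETYPE = [
--     'cowboy', 'robot', 'drill sergeant', 'mentor', 'teacher', 'coach',
--     'pirate', 'knight', 'wizard', 'detective', 'scientist', 'rebel'
-- ]
--
-- _INDICATORS = (
--     [(p, 0) for p in _CELEBRITY]
--     + [(p, 1) for p in _FICTIONAL]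
--     + [(p, 2) for p in _ARCHETYPE]
-- )
--
--
-- def detect_personality_type(description):
--     """One flat pass over (indicator, rank) pairs keeping the minimum
--     matching rank; the rank indexes the category name."""
--     d = description.lower()
--     best = 3
--     for pat, rank in _INDICATORS:
--         if pat in d:
--             best = min(best, rank)
--     return _CATEGORIES[best] if best < 3 else None
-- ===== Notes on version B (the rewrite author's own statement) =====
-- stated objective: alternative
-- what changed: A runs three sequential per-category loops with early return; B folds once over a single flat list of (indicator, rank) pairs keeping the minimum matching rank and maps that rank to the category name.
import Mathlib
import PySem

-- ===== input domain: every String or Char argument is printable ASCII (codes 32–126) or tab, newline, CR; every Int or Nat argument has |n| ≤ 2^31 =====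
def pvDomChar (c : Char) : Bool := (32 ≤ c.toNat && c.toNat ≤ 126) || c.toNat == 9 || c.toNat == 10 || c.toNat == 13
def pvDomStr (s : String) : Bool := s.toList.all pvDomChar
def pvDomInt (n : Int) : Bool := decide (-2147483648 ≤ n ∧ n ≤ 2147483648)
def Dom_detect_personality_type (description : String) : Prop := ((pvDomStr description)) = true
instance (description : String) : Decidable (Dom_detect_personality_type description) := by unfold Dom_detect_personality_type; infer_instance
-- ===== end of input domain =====

-- B replaces A's three sequential per-category early-return loops by one fold over a flat list of
-- (indicator, rank) pairs keeping the minimum matching rank (objective: alternative, same cost).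

-- ===== PORT A =====
def pvCelA : List String :=
  ["actor", "actress", "singer", "musician", "politician", "scientist",
   "author", "writer", "director", "artist", "athlete", "celebrity"]
def pvFicA : List String :=
  ["character", "from", "movie", "book", "tv show", "series", "novel",
   "comic", "anime", "manga", "game", "fictional"]
def pvArcA : List String :=
  ["cowboy", "robot", "drill sergeant", "mentor", "teacher", "coach",
   "pirate", "knight", "wizard", "detective", "scientist", "rebel"]

-- 'for indicator in …: if indicator in description_lower: return …' as first-hit recursion
def pvLoopA : List String → String → Bool
  | [], _ => false
  | i :: rest, d => if PySem.Str.isIn i d then true else pvLoopA rest d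

def detect_personality_type (description : String) : Option String :=
  let dl := PySem.Str.lower description
  if pvLoopA pvCelA dl then some "celebrity"
  else if pvLoopA pvFicA dl then some "fictional"
  else if pvLoopA pvArcA dl then some "archetype"
  else none

-- ===== PORT B =====
def pvCategoriesB : List String := ["celebrity", "fictional", "archetype"]

def pvPairsB : List (String × Nat) :=
  (["actor", "actress", "singer", "musician", "politician", "scientist",
    "author", "writer", "director", "artist", "athlete", "celebrity"].map (fun p => (p, 0)))
  ++ (["character", "from", "movie", "book", "tv show", "series", "novel",
       "comic", "anime", "manga", "game", "fictional"].map (fun p => (p, 1)))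
  ++ (["cowboy", "robot", "drill sergeant", "mentor", "teacher", "coach",
       "pirate", "knight", "wizard", "detective", "scientist", "rebel"].map (fun p => (p, 2)))

def detect_personality_type_alt (description : String) : Option String :=
  let d := PySem.Str.lower description
  let best : Nat := pvPairsB.foldl
    (fun b pr => if PySem.Str.isIn pr.1 d then min b pr.2 else b) 3
  if best < 3 then PySem.List.pyGet? pvCategoriesB (Int.ofNat best) else none

-- ===== PRECONDITION & SPEC =====
def Spec_detect_personality_type (description : String) (out : Option String) : Prop := out = detect_personality_type_alt description
instance (description : String) (out : Option String) : Decidable (Spec_detect_personality_type description out) := by unfold Spec_detect_personality_type; infer_instance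

-- ===== CLAIM (what is proved, stated in full; the proofs are below) =====
def Claim_equal_detect_personality_type : Prop := ∀ (description : String), Dom_detect_personality_type description → Spec_detect_personality_type description (detect_personality_type description)

-- ===== LEMMAS AND PROOFS =====

-- A's first-hit loop is an 'any' over the category list
theorem pvLoopA_eq_any (ps : List String) (d : String) :
    pvLoopA ps d = ps.any (fun p => PySem.Str.isIn p d) := by
  induction ps with
  | nil => simp [pvLoopA]
  | cons i rest ih =>
      simp only [pvLoopA, List.any_cons, ih]
      cases h : PySem.Str.isIn i d <;> simp [h]

-- folding the min-rank update over one category's pairs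
theorem pvFold_map (ps : List String) (r : Nat) (d : String) (acc : Nat) :
    (ps.map (fun p => (p, r))).foldl
        (fun b pr => if PySem.Str.isIn pr.1 d then min b pr.2 else b) acc
      = if ps.any (fun p => PySem.Str.isIn p d) then min acc r else acc := by
  induction ps generalizing acc with
  | nil => simp
  | cons p rest ih =>
      cases h : PySem.Str.isIn p d with
      | false =>
          simp only [List.map_cons, List.foldl_cons, h, Bool.false_eq_true, if_false,
            List.any_cons, Bool.false_or, ih]
      | true =>
          simp only [List.map_cons, List.foldl_cons, h, if_true, List.any_cons,
            Bool.true_or, ih]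
          cases h2 : rest.any (fun p => PySem.Str.isIn p d) with
          | false => simp
          | true => simp

-- the flat fold computes A's category priority as a rank
theorem pvBest_eq (d : String) :
    pvPairsB.foldl (fun b pr => if PySem.Str.isIn pr.1 d then min b pr.2 else b) 3
      = if pvCelA.any (fun p => PySem.Str.isIn p d) then 0
        else if pvFicA.any (fun p => PySem.Str.isIn p d) then 1
        else if pvArcA.any (fun p => PySem.Str.isIn p d) then 2 else 3 := by
  have hp : pvPairsB
      = pvCelA.map (fun p => (p, 0)) ++ pvFicA.map (fun p => (p, 1))
        ++ pvArcA.map (fun p => (p, 2)) := rfl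
  rw [hp, List.foldl_append, List.foldl_append, pvFold_map, pvFold_map, pvFold_map]
  cases hC : pvCelA.any (fun p => PySem.Str.isIn p d) <;>
    cases hF : pvFicA.any (fun p => PySem.Str.isIn p d) <;>
      cases hA : pvArcA.any (fun p => PySem.Str.isIn p d) <;> simp

-- ===== VERDICT (by name: the statement is the Claim_ definition above) =====
theorem detect_personality_type_spec : Claim_equal_detect_personality_type := by
  intro description _
  show _ = _
  simp only [detect_personality_type, detect_personality_type_alt]
  rw [pvLoopA_eq_any, pvLoopA_eq_any, pvLoopA_eq_any, pvBest_eq]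
  cases hC : pvCelA.any (fun p => PySem.Str.isIn p (PySem.Str.lower description)) <;>
    cases hF : pvFicA.any (fun p => PySem.Str.isIn p (PySem.Str.lower description)) <;>
      cases hA : pvArcA.any (fun p => PySem.Str.isIn p (PySem.Str.lower description)) <;>
        simp [pvCategoriesB, PySem.List.pyGet?, PySem.List.pyIdx?]
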